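-- pv_equiv track=rewrite | github.com/bjih1999/algorithm | programmers/greedy/조이스틱/solution.py | solution
-- ===== SOURCE A (Python) =====
-- def _move_vertical(pos, count, name):
--     if((ord(name[pos]) - ord('A') <= 13)):
--         count[0] += ord(name[pos]) - ord('A')
--     else:
--         count[0] += ord('Z') - ord(name[pos]) + 1
--
-- def _move_horizon(pos, count, visited, name):
--     _move_vertical(pos, count, name)
--
--     while visited.count(0) > 0:
--         distances = []
--         for index, value in enumerate(visited):
--             if value == 0:
--                 distances.append((index ,min(abs(index - pos), abs(((pos+1) - (index+1)) + len(name)))))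
--
--         distances = sorted(distances, key=lambda x:x[1])
--         visited[distances[0][0]] = 1
--         pos = distances[0][0]
--         count[0] += distances[0][1]
--
--         _move_vertical(pos, count, name)
--
-- def solution(name):
--     visited = [0 for x in range(len(name))]
--     count = [0]
--     answer = 0
--
--     for x in range(len(name)):
--         if name[x] == 'A':
--             visited[x] = 1
--
--     visited[0] = 1
--     _move_horizon(0, count, visited, name)
--
--     return count[0]
-- ===== SOURCE B (Python) =====
-- def solution(name):
--     n = len(name)
--
--     def vert(c):
--         o = ord(c) - ord('A')
--         return o if o <= 13 else 26 - o
--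
--     total = vert(name[0])
--     rem = []                      # unvisited positions, ascending
--     for i in range(1, n):
--         if name[i] != 'A':
--             total += vert(name[i])
--             rem.append(i)
--
--     pos = 0
--     j = 0                         # insertion point of pos in rem (#elements < pos)
--     while rem:
--         # nearest unvisited is among: predecessor, successor, rightmost
--         best = None
--         bidx = -1
--         for idx in (j - 1, j, len(rem) - 1):
--             if 0 <= idx < len(rem):
--                 i = rem[idx]
--                 d = pos - i if i < pos else min(i - pos, n - (i - pos))
--                 if best is None or (d, i) < best:
--                     best = (d, i)
--                     bidx = idx
--         d, pos = best
--         total += d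
--         rem.pop(bidx)
--         j = bidx
--     return total
-- ===== Notes on version B (the rewrite author's own statement) =====
-- stated objective: faster
-- what changed: B keeps the unvisited positions as a sorted list with the current position's insertion point maintained across steps, so each greedy step picks the nearest target from only three candidates (predecessor, successor, rightmost) in O(1) instead of rebuilding and sorting a full distance list over the visited array, and the per-letter vertical cost is summed once up front instead of being accumulated through a mutable one-element list.
import Mathlib
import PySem

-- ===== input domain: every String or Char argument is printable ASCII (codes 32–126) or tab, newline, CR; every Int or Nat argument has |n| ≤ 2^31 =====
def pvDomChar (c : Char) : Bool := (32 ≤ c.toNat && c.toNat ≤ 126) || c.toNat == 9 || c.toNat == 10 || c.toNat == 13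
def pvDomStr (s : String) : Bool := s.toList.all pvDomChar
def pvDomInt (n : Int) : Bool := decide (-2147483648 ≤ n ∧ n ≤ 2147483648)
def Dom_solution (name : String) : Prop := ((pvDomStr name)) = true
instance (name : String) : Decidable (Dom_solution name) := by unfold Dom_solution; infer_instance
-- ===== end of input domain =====

-- One honest line: B replaces A's per-step rescan+sort of the visited array by a sorted
-- unvisited list with a maintained insertion point (three-candidate O(1) greedy pick) and a
-- one-pass up-front vertical-cost sum; measurably faster (asymptotic).

-- ===== PORT A =====

-- _move_vertical's increment (A mutates count[0]; ported as the added value)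
def pvVertA (cs : List Char) (p : Nat) : Int :=
  if ((cs.getD p 'A').toNat : Int) - 65 ≤ 13 then ((cs.getD p 'A').toNat : Int) - 65
  else 90 - ((cs.getD p 'A').toNat : Int) + 1

-- the distance expression inside A's loop: min(abs(index - pos), abs(((pos+1) - (index+1)) + len(name)))
def pvDistA (n pos i : Int) : Int :=
  min ((i - pos).natAbs : Int) ((pos + 1 - (i + 1) + n).natAbs : Int)

-- the while-loop of _move_horizon; fuel bounds the iterations (each sets one 0 to 1)
def pvLoopA (cs : List Char) (n : Int) : Nat → Int → List Int → Int → Int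
  | 0, _, _, count => count
  | fuel + 1, pos, visited, count =>
    if 0 < visited.count 0 then
      match PySem.List.sorted
          ((PySem.List.enumerate visited).filterMap
            (fun p => if p.2 = 0 then some (p.1, pvDistA n pos p.1) else none))
          (fun x => x.2) false with
      | [] => count            -- unreachable: distances ≠ [] when a 0 is present
      | d0 :: _ =>
        pvLoopA cs n fuel d0.1 (visited.set d0.1.toNat 1) (count + d0.2 + pvVertA cs d0.1.toNat)
    else count

def solution (name : String) : Int :=
  let cs := name.toList
  let n := cs.length
  let visited := (List.range n).foldl
    (fun v x => if cs.getD x 'A' = 'A' then v.set x 1 else v) (List.replicate n (0 : Int))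
  let visited := visited.set 0 1
  pvLoopA cs (n : Int) (n + 1) 0 visited (pvVertA cs 0)

-- ===== PORT B =====

def pvVertB (c : Char) : Int :=
  if ((c.toNat : Int) - 65) ≤ 13 then (c.toNat : Int) - 65 else 26 - ((c.toNat : Int) - 65)

def pvDistB (n pos i : Int) : Int :=
  if i < pos then pos - i else min (i - pos) (n - (i - pos))

-- the three-candidate scan: for idx in (j-1, j, len(rem)-1): … keep lexicographic min of (d, i)
def pvPick (rem : List Int) (n pos j : Int) : Option (Int × Int) × Int :=
  [j - 1, j, (rem.length : Int) - 1].foldl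
    (fun st idx =>
      if 0 ≤ idx ∧ idx < (rem.length : Int) then
        let i := rem.getD idx.toNat 0
        let d := pvDistB n pos i
        match st.1 with
        | none => (some (d, i), idx)
        | some b => if d < b.1 ∨ (d = b.1 ∧ i < b.2) then (some (d, i), idx) else st
      else st)
    (none, -1)

def pvLoopB (n : Int) : Nat → List Int → Int → Int → Int → Int
  | 0, _, _, _, total => total
  | fuel + 1, rem, pos, j, total =>
    match rem with
    | [] => total
    | _ :: _ =>
      match pvPick rem n pos j with
      | (some (d, i), bidx) =>
        match PySem.List.pop? rem bidx with
        | some pr => pvLoopB n fuel pr.2 i bidx (total + d)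
        | none => total        -- unreachable: bidx is a valid index
      | (none, _) => total     -- unreachable: rem ≠ [] so the last candidate is valid

def solution_alt (name : String) : Int :=
  let cs := name.toList
  let n : Int := cs.length
  let st := (PySem.List.pyRange 1 n 1).foldl
    (fun (st : Int × List Int) i =>
      if cs.getD i.toNat 'A' ≠ 'A' then (st.1 + pvVertB (cs.getD i.toNat 'A'), st.2 ++ [i])
      else st)
    (pvVertB (cs.getD 0 'A'), [])
  pvLoopB n st.2.length st.2 0 0 st.1

-- ===== PRECONDITION & SPEC =====
-- Pre_ excludes only the empty string, on which the Python A raises IndexError (visited[0] = 1).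
def Pre_solution (name : String) : Prop := name ≠ ""
instance (name : String) : Decidable (Pre_solution name) := by unfold Pre_solution; infer_instance
def pvWitness_solution : String := "JEROEN"

def Spec_solution (name : String) (out : Int) : Prop := out = solution_alt name
instance (name : String) (out : Int) : Decidable (Spec_solution name out) := by unfold Spec_solution; infer_instance

-- ===== CLAIM (what is proved, stated in full; the proofs are below) =====
def Claim_equal_solution : Prop := ∀ (name : String), Dom_solution name → Pre_solution name → Spec_solution name (solution name)


-- ===== LEMMAS AND PROOFS =====

-- head of PySem's stable insertion sort, step 1: head of one insertion
theorem pv_head?_insertBy {α : Type} (bef : α → α → Bool) (x : α) (ys : List α) :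
    (PySem.List.insertBy bef x ys).head? =
      some (match ys with | [] => x | y :: _ => if bef x y then x else y) := by
  cases ys with
  | nil => simp [PySem.List.insertBy]
  | cons y t => by_cases h : bef x y = true <;> simp [PySem.List.insertBy, h]

-- head of the insertion-sort foldl is the running strict-minimum fold
theorem pv_head?_foldl_insertBy {α : Type} (key : α → Int) :
    ∀ (xs : List α) (acc : List α) (b : α), acc.head? = some b →
    ((xs.foldl (fun acc x => PySem.List.insertBy (fun a c => decide (key a < key c)) x acc) acc).head?
      = some (xs.foldl (fun b y => if key y < key b then y else b) b)) := by
  intro xs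
  induction xs with
  | nil => intro acc b h; simpa using h
  | cons x t ih =>
    intro acc b h
    cases acc with
    | nil => exact absurd h (by simp)
    | cons a rest =>
      simp only [List.head?_cons, Option.some.injEq] at h
      subst h
      simp only [List.foldl_cons]
      apply ih
      rw [pv_head?_insertBy]
      by_cases hk : key x < key a <;> simp [hk]

theorem pv_head?_sorted {α : Type} (key : α → Int) (x : α) (xs : List α) :
    (PySem.List.sorted (x :: xs) key false).head? =
      some (xs.foldl (fun b y => if key y < key b then y else b) x) := by
  rw [PySem.List.sorted_eq_foldl_insertBy]
  simp only [List.foldl_cons]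
  apply pv_head?_foldl_insertBy
  simp [PySem.List.insertBy]

-- the running strict-minimum fold over a list with strictly increasing first components
-- is the lexicographic minimum of (snd, fst)
theorem pv_runmin_lex : ∀ (xs : List (Int × Int)) (b : Int × Int),
    (∀ y ∈ xs, b.1 < y.1) → List.Pairwise (fun p q => p.1 < q.1) xs →
    (xs.foldl (fun b y => if y.2 < b.2 then y else b) b = b ∨
      (xs.foldl (fun b y => if y.2 < b.2 then y else b) b ∈ xs ∧
       (xs.foldl (fun b y => if y.2 < b.2 then y else b) b).2 < b.2)) ∧
    (∀ y ∈ xs,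
      (xs.foldl (fun b y => if y.2 < b.2 then y else b) b).2 < y.2 ∨
      ((xs.foldl (fun b y => if y.2 < b.2 then y else b) b).2 = y.2 ∧
       (xs.foldl (fun b y => if y.2 < b.2 then y else b) b).1 ≤ y.1)) := by
  intro xs
  induction xs with
  | nil => intro b _ _; exact ⟨Or.inl rfl, by simp⟩
  | cons x t ih =>
    intro b hlt hpw
    rw [List.pairwise_cons] at hpw
    simp only [List.foldl_cons]
    by_cases hx : x.2 < b.2
    · simp only [if_pos hx]
      obtain ⟨h1, h2⟩ := ih x (fun y hy => hpw.1 y hy) hpw.2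
      refine ⟨?_, ?_⟩
      · rcases h1 with h | ⟨hm, hm2⟩
        · exact Or.inr ⟨by rw [h]; exact List.mem_cons_self .., by rw [h]; exact hx⟩
        · exact Or.inr ⟨List.mem_cons_of_mem _ hm, lt_trans hm2 hx⟩
      · intro y hy
        rcases List.mem_cons.mp hy with rfl | hy'
        · rcases h1 with h | ⟨_, hm2⟩
          · exact Or.inr ⟨by rw [h], by rw [h]⟩
          · exact Or.inl hm2
        · exact h2 y hy'
    · simp only [if_neg hx]
      have hx' := not_lt.mp hx
      obtain ⟨h1, h2⟩ := ih b (fun y hy => hlt y (List.mem_cons_of_mem _ hy)) hpw.2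
      refine ⟨?_, ?_⟩
      · rcases h1 with h | ⟨hm, hm2⟩
        · exact Or.inl h
        · exact Or.inr ⟨List.mem_cons_of_mem _ hm, hm2⟩
      · intro y hy
        rcases List.mem_cons.mp hy with rfl | hy'
        · rcases h1 with h | ⟨_, hm2⟩
          · rcases lt_or_eq_of_le hx' with h' | h'
            · exact Or.inl (by rw [h]; exact h')
            · exact Or.inr ⟨by rw [h]; exact h'.symm ▸ rfl,
                by rw [h]; exact le_of_lt (hlt y (List.mem_cons_self ..))⟩
          · exact Or.inl (lt_of_lt_of_le hm2 hx')
        · exact h2 y hy'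



-- getElem? of the visited-initialisation foldl (A's for-x-in-range marking loop)
theorem pv_foldl_set_getElem? (P : Nat → Prop) [DecidablePred P] :
    ∀ (l : List Nat) (v : List Int) (k : Nat), k < v.length →
    (l.foldl (fun v x => if P x then v.set x 1 else v) v)[k]? =
      (if k ∈ l ∧ P k then some 1 else v[k]?) := by
  intro l
  induction l with
  | nil => intro v k hk; simp
  | cons x t ih =>
    intro v k hk
    simp only [List.foldl_cons]
    by_cases hx : P x
    · rw [if_pos hx, ih _ k (by simpa using hk)]
      by_cases hkt : k ∈ t ∧ P k
      · rw [if_pos hkt, if_pos ⟨List.mem_cons_of_mem _ hkt.1, hkt.2⟩]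
      · rw [if_neg hkt]
        by_cases hxk : x = k
        · subst hxk
          rw [List.getElem?_set_self hk, if_pos ⟨List.mem_cons_self .., hx⟩]
        · rw [List.getElem?_set_ne hxk]
          rw [if_neg]
          rintro ⟨hmem, hPk⟩
          rcases List.mem_cons.mp hmem with h | h
          · exact hxk h.symm
          · exact hkt ⟨h, hPk⟩
    · rw [if_neg hx, ih _ k hk]
      by_cases hkt : k ∈ t ∧ P k
      · rw [if_pos hkt, if_pos ⟨List.mem_cons_of_mem _ hkt.1, hkt.2⟩]
      · rw [if_neg hkt, if_neg]
        rintro ⟨hmem, hPk⟩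
        rcases List.mem_cons.mp hmem with h | h
        · subst h; exact hx hPk
        · exact hkt ⟨h, hPk⟩

theorem pv_foldl_set_length (P : Nat → Prop) [DecidablePred P] :
    ∀ (l : List Nat) (v : List Int),
    (l.foldl (fun v x => if P x then v.set x 1 else v) v).length = v.length := by
  intro l
  induction l with
  | nil => intro v; rfl
  | cons x t ih =>
    intro v
    simp only [List.foldl_cons]
    by_cases hx : P x
    · rw [if_pos hx, ih]; simp
    · rw [if_neg hx, ih]

-- B's initial pass: accumulated sum and appended list in one foldl
theorem pv_initfold (g : Int → Int) (q : Int → Prop) [DecidablePred q] :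
    ∀ (l : List Int) (t : Int) (r : List Int),
    l.foldl (fun (st : Int × List Int) i => if q i then (st.1 + g i, st.2 ++ [i]) else st) (t, r) =
      (t + ((l.filter (fun i => decide (q i))).map g).sum, r ++ l.filter (fun i => decide (q i))) := by
  intro l
  induction l with
  | nil => intro t r; simp
  | cons x xs ih =>
    intro t r
    simp only [List.foldl_cons, List.filter_cons]
    by_cases hx : q x
    · simp only [if_pos hx, hx, ih, List.map_cons, List.sum_cons]
      refine Prod.ext ?_ ?_
      · simp; ring
      · simp
    · simp only [if_neg hx, hx, ih]
      simp

-- the ascending list of indices of zeros of `visited`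
def pvZs (v : List Int) : List Int :=
  (PySem.List.enumerate v).filterMap (fun p => if p.2 = 0 then some p.1 else none)

theorem pv_mem_pvZs (v : List Int) (i : Int) :
    i ∈ pvZs v ↔ (0 ≤ i ∧ i.toNat < v.length ∧ v[i.toNat]? = some 0) := by
  unfold pvZs
  rw [List.mem_filterMap]
  constructor
  · rintro ⟨p, hp, hif⟩
    obtain ⟨k, hk, rfl⟩ := (PySem.List.mem_enumerate_iff _ _ _).mp hp
    have hif' : (if v[k] = 0 then some ((0:Int) + k) else none) = some i := hif
    by_cases h0 : v[k] = 0
    · rw [if_pos h0] at hif'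
      have hik : (0:Int) + k = i := Option.some.inj hif'
      have hkn : i.toNat = k := by omega
      refine ⟨by omega, by omega, ?_⟩
      rw [hkn, List.getElem?_eq_getElem hk, h0]
    · rw [if_neg h0] at hif'
      cases hif'
  · rintro ⟨h0, hk, hv⟩
    have hvk : v[i.toNat] = 0 := by
      rw [List.getElem?_eq_getElem hk] at hv
      exact Option.some.inj hv
    refine ⟨(i, 0), ?_, by simp⟩
    rw [PySem.List.mem_enumerate_iff]
    refine ⟨i.toNat, hk, ?_⟩
    rw [hvk, show ((0:Int) + (i.toNat : Int)) = i by omega]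

theorem pv_pairwise_pvZs (v : List Int) : (pvZs v).Pairwise (· < ·) := by
  unfold pvZs
  refine List.Pairwise.filterMap _ ?_ (PySem.List.pairwise_lt_enumerate _ _)
  intro p q hpq x hx y hy
  by_cases hp : p.2 = 0
  · by_cases hq : q.2 = 0
    · simp only [if_pos hp, Option.mem_def, Option.some.injEq] at hx
      simp only [if_pos hq, Option.mem_def, Option.some.injEq] at hy
      omega
    · simp [if_neg hq] at hy
  · simp [if_neg hp] at hx

-- two strictly ascending integer lists with the same members are equal
theorem pv_sorted_ext (l₁ l₂ : List Int) (h₁ : l₁.Pairwise (· < ·)) (h₂ : l₂.Pairwise (· < ·))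
    (hm : ∀ x, x ∈ l₁ ↔ x ∈ l₂) : l₁ = l₂ := by
  refine List.Perm.eq_of_pairwise (fun a b _ _ hab hba => by omega) h₁ h₂ ?_
  rw [List.perm_ext_iff_of_nodup (h₁.imp ne_of_lt) (h₂.imp ne_of_lt)]
  exact hm

-- A's and B's per-letter vertical increments agree
theorem pv_vert_eq (cs : List Char) (p : Nat) : pvVertA cs p = pvVertB (cs.getD p 'A') := by
  unfold pvVertA pvVertB
  split_ifs <;> omega

-- A's and B's distance expressions agree on in-range positions
theorem pv_dist_eq (n pos i : Int) (h1 : 0 ≤ pos) (h2 : pos < n) (h3 : 0 ≤ i) (h4 : i < n) :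
    pvDistA n pos i = pvDistB n pos i := by
  unfold pvDistA pvDistB
  split_ifs <;> omega



-- strict monotonicity of an ascending list, via getD
theorem pv_getD_mono (rem : List Int) (hsort : rem.Pairwise (· < ·)) (a b : Nat)
    (hab : a < b) (hb : b < rem.length) : rem.getD a 0 < rem.getD b 0 := by
  rw [List.getD_eq_getElem _ _ (lt_trans hab hb), List.getD_eq_getElem _ _ hb]
  exact List.pairwise_iff_getElem.mp hsort a b (lt_trans hab hb) hb hab

-- lexicographic (distance, position) order used by B's selection
def pvLex (p q : Int × Int) : Prop := p.1 < q.1 ∨ (p.1 = q.1 ∧ p.2 ≤ q.2)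

theorem pv_lex_trans {a b c : Int × Int} (h1 : pvLex a b) (h2 : pvLex b c) : pvLex a c := by
  unfold pvLex at *; omega

-- every unvisited position is lex-dominated by one of B's three candidates
theorem pv_cand_spec (rem : List Int) (n pos j : Int)
    (hsort : rem.Pairwise (· < ·))
    (hj0 : 0 ≤ j) (hjlen : j ≤ (rem.length : Int))
    (hjlo : ∀ k : Nat, k < j.toNat → rem.getD k 0 < pos)
    (hjhi : ∀ k : Nat, j.toNat ≤ k → k < rem.length → pos < rem.getD k 0)
    (k : Nat) (hk : k < rem.length) :
    (k < j.toNat →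
      pvLex (pvDistB n pos (rem.getD (j - 1).toNat 0), rem.getD (j - 1).toNat 0)
            (pvDistB n pos (rem.getD k 0), rem.getD k 0)) ∧
    (j.toNat ≤ k →
      (pvLex (pvDistB n pos (rem.getD j.toNat 0), rem.getD j.toNat 0)
             (pvDistB n pos (rem.getD k 0), rem.getD k 0) ∨
       pvLex (pvDistB n pos (rem.getD (rem.length - 1) 0), rem.getD (rem.length - 1) 0)
             (pvDistB n pos (rem.getD k 0), rem.getD k 0))) := by
  constructor
  · intro hkj
    have hj1 : 1 ≤ j := by omega
    rw [show (j - 1).toNat = j.toNat - 1 by omega]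
    have hP : rem.getD (j.toNat - 1) 0 < pos := hjlo _ (by omega)
    have hK : rem.getD k 0 < pos := hjlo _ hkj
    have hKP : rem.getD k 0 ≤ rem.getD (j.toNat - 1) 0 := by
      rcases Nat.eq_or_lt_of_le (by omega : k ≤ j.toNat - 1) with h | h
      · rw [h]
      · exact le_of_lt (pv_getD_mono rem hsort _ _ h (by omega))
    unfold pvLex pvDistB
    split_ifs <;> omega
  · intro hjk
    have hS : pos < rem.getD j.toNat 0 := hjhi _ le_rfl (by omega)
    have hK : pos < rem.getD k 0 := hjhi _ hjk hk
    have hL : pos < rem.getD (rem.length - 1) 0 := hjhi _ (by omega) (by omega)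
    have hSK : rem.getD j.toNat 0 ≤ rem.getD k 0 := by
      rcases Nat.eq_or_lt_of_le hjk with h | h
      · rw [h]
      · exact le_of_lt (pv_getD_mono rem hsort _ _ h hk)
    have hKL : rem.getD k 0 ≤ rem.getD (rem.length - 1) 0 := by
      rcases Nat.eq_or_lt_of_le (by omega : k ≤ rem.length - 1) with h | h
      · rw [h]
      · exact le_of_lt (pv_getD_mono rem hsort _ _ h (by omega))
    by_cases hc : rem.getD k 0 - pos ≤ n - (rem.getD k 0 - pos)
    · left; unfold pvLex pvDistB; split_ifs <;> omega
    · right; unfold pvLex pvDistB; split_ifs <;> omega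

-- the state invariant of B's three-candidate fold
def pvOk (rem : List Int) (n pos : Int) (st : Option (Int × Int) × Int) : Prop :=
  st.1 = none ∨ ∃ bi : Int, st.2 = bi ∧ 0 ≤ bi ∧ bi.toNat < rem.length ∧
    st.1 = some (pvDistB n pos (rem.getD bi.toNat 0), rem.getD bi.toNat 0)

-- B's candidate fold keeps the lex minimum of the valid candidates seen
theorem pv_pickFold (rem : List Int) (n pos : Int) :
    ∀ (idxs : List Int) (st : Option (Int × Int) × Int), pvOk rem n pos st →
    pvOk rem n pos (idxs.foldl
      (fun st idx =>
        if 0 ≤ idx ∧ idx < (rem.length : Int) then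
          let i := rem.getD idx.toNat 0
          let d := pvDistB n pos i
          match st.1 with
          | none => (some (d, i), idx)
          | some b => if d < b.1 ∨ (d = b.1 ∧ i < b.2) then (some (d, i), idx) else st
        else st) st) ∧
    (∀ q : Int × Int, st.1 = some q →
      ∃ p, (idxs.foldl
      (fun st idx =>
        if 0 ≤ idx ∧ idx < (rem.length : Int) then
          let i := rem.getD idx.toNat 0
          let d := pvDistB n pos i
          match st.1 with
          | none => (some (d, i), idx)
          | some b => if d < b.1 ∨ (d = b.1 ∧ i < b.2) then (some (d, i), idx) else st
        else st) st).1 = some p ∧ pvLex p q) ∧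
    (∀ idx ∈ idxs, 0 ≤ idx → idx < (rem.length : Int) →
      ∃ p, (idxs.foldl
      (fun st idx =>
        if 0 ≤ idx ∧ idx < (rem.length : Int) then
          let i := rem.getD idx.toNat 0
          let d := pvDistB n pos i
          match st.1 with
          | none => (some (d, i), idx)
          | some b => if d < b.1 ∨ (d = b.1 ∧ i < b.2) then (some (d, i), idx) else st
        else st) st).1 = some p ∧
        pvLex p (pvDistB n pos (rem.getD idx.toNat 0), rem.getD idx.toNat 0)) := by
  intro idxs
  induction idxs with
  | nil =>
    intro st hok
    refine ⟨hok, fun q hq => ⟨q, hq, Or.inr ⟨rfl, le_rfl⟩⟩, by simp⟩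
  | cons idx rest ih =>
    intro st hok
    simp only [List.foldl_cons]
    -- one step of the fold
    have hstep : ∀ st : Option (Int × Int) × Int, pvOk rem n pos st →
        pvOk rem n pos (if 0 ≤ idx ∧ idx < (rem.length : Int) then
          let i := rem.getD idx.toNat 0
          let d := pvDistB n pos i
          match st.1 with
          | none => (some (d, i), idx)
          | some b => if d < b.1 ∨ (d = b.1 ∧ i < b.2) then (some (d, i), idx) else st
        else st) ∧
        (∀ q : Int × Int, st.1 = some q →
          ∃ p', (if 0 ≤ idx ∧ idx < (rem.length : Int) then
            let i := rem.getD idx.toNat 0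
            let d := pvDistB n pos i
            match st.1 with
            | none => (some (d, i), idx)
            | some b => if d < b.1 ∨ (d = b.1 ∧ i < b.2) then (some (d, i), idx) else st
          else st).1 = some p' ∧ pvLex p' q) ∧
        (0 ≤ idx → idx < (rem.length : Int) →
          ∃ p', (if 0 ≤ idx ∧ idx < (rem.length : Int) then
            let i := rem.getD idx.toNat 0
            let d := pvDistB n pos i
            match st.1 with
            | none => (some (d, i), idx)
            | some b => if d < b.1 ∨ (d = b.1 ∧ i < b.2) then (some (d, i), idx) else st
          else st).1 = some p' ∧
          pvLex p' (pvDistB n pos (rem.getD idx.toNat 0), rem.getD idx.toNat 0)) := by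
      intro st hok
      by_cases hv : 0 ≤ idx ∧ idx < (rem.length : Int)
      · rw [if_pos hv]
        cases hst1 : st.1 with
        | none =>
          simp only [hst1]
          refine ⟨Or.inr ⟨idx, rfl, hv.1, by omega, rfl⟩, ?_, ?_⟩
          · intro q hq; exact absurd hq (by simp)
          · intro _ _; exact ⟨_, rfl, Or.inr ⟨rfl, le_rfl⟩⟩
        | some b =>
          simp only [hst1]
          by_cases hcmp : pvDistB n pos (rem.getD idx.toNat 0) < b.1 ∨
              (pvDistB n pos (rem.getD idx.toNat 0) = b.1 ∧ rem.getD idx.toNat 0 < b.2)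
          · rw [if_pos hcmp]
            refine ⟨Or.inr ⟨idx, rfl, hv.1, by omega, rfl⟩, ?_, ?_⟩
            · intro q hq
              have hbq : b = q := Option.some.inj hq
              subst hbq
              exact ⟨_, rfl, by unfold pvLex; omega⟩
            · intro _ _; exact ⟨_, rfl, Or.inr ⟨rfl, le_rfl⟩⟩
          · rw [if_neg hcmp]
            refine ⟨hok, ?_, ?_⟩
            · intro q hq
              have hbq : b = q := Option.some.inj hq
              subst hbq
              exact ⟨b, hst1, Or.inr ⟨rfl, le_rfl⟩⟩
            · intro _ _
              exact ⟨b, hst1, by unfold pvLex; omega⟩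
      · rw [if_neg hv]
        refine ⟨hok, fun q hq => ⟨q, hq, Or.inr ⟨rfl, le_rfl⟩⟩, fun h1 h2 => absurd ⟨h1, h2⟩ hv⟩
    obtain ⟨hok', hrel, hkey⟩ := hstep st hok
    obtain ⟨ihok, ihrel, ihkey⟩ := ih _ hok'
    refine ⟨ihok, ?_, ?_⟩
    · intro q hq
      obtain ⟨p', hp', hlex'⟩ := hrel q hq
      obtain ⟨p, hp, hlex⟩ := ihrel p' hp'
      exact ⟨p, hp, pv_lex_trans hlex hlex'⟩
    · intro idx' hidx' h0 hlen
      rcases List.mem_cons.mp hidx' with rfl | hmem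
      · obtain ⟨p', hp', hlex'⟩ := hkey h0 hlen
        obtain ⟨p, hp, hlex⟩ := ihrel p' hp'
        exact ⟨p, hp, pv_lex_trans hlex hlex'⟩
      · exact ihkey idx' hmem h0 hlen


-- select of B: there is a valid returned index and it is the lex minimum over all of rem
theorem pv_pick_spec (rem : List Int) (n pos j : Int)
    (hsort : rem.Pairwise (· < ·))
    (hj0 : 0 ≤ j) (hjlen : j ≤ (rem.length : Int))
    (hjlo : ∀ k : Nat, k < j.toNat → rem.getD k 0 < pos)
    (hjhi : ∀ k : Nat, j.toNat ≤ k → k < rem.length → pos < rem.getD k 0)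
    (hne : rem ≠ []) :
    ∃ bi : Int, 0 ≤ bi ∧ bi.toNat < rem.length ∧
      pvPick rem n pos j = (some (pvDistB n pos (rem.getD bi.toNat 0), rem.getD bi.toNat 0), bi) ∧
      ∀ k : Nat, k < rem.length →
        pvLex (pvDistB n pos (rem.getD bi.toNat 0), rem.getD bi.toNat 0)
              (pvDistB n pos (rem.getD k 0), rem.getD k 0) := by
  have hlen1 : 1 ≤ rem.length := List.length_pos_of_ne_nil hne
  obtain ⟨hok, hrel, hkey⟩ :=
    pv_pickFold rem n pos [j - 1, j, (rem.length : Int) - 1] (none, -1) (Or.inl rfl)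
  obtain ⟨p3, hp3, hlex3⟩ := hkey ((rem.length : Int) - 1) (by simp) (by omega) (by omega)
  rcases hok with h | ⟨bi, hbi2, hbi0, hbilen, hbi1⟩
  · rw [h] at hp3; cases hp3
  · refine ⟨bi, hbi0, hbilen, ?_, ?_⟩
    · show ([j - 1, j, (rem.length : Int) - 1].foldl _ (none, -1)) = _
      have := Prod.mk.eta (p := [j - 1, j, (rem.length : Int) - 1].foldl
        (fun st idx =>
          if 0 ≤ idx ∧ idx < (rem.length : Int) then
            let i := rem.getD idx.toNat 0
            let d := pvDistB n pos i
            match st.1 with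
            | none => (some (d, i), idx)
            | some b => if d < b.1 ∨ (d = b.1 ∧ i < b.2) then (some (d, i), idx) else st
          else st) (none, -1))
      rw [← this, hbi1, hbi2]
    · intro k hk
      by_cases hkj : k < j.toNat
      · have hj1 : 1 ≤ j := by omega
        obtain ⟨p1, hp1, hlex1⟩ := hkey (j - 1) (by simp) (by omega) (by omega)
        rw [hbi1] at hp1
        have hp1' := Option.some.inj hp1
        subst hp1'
        exact pv_lex_trans hlex1
          ((pv_cand_spec rem n pos j hsort hj0 hjlen hjlo hjhi k hk).1 hkj)
      · have hjk : j.toNat ≤ k := by omega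
        have hjlt : j < (rem.length : Int) := by omega
        obtain ⟨p2, hp2, hlex2⟩ := hkey j (by simp) hj0 hjlt
        rw [hbi1] at hp2
        have hp2' := Option.some.inj hp2
        subst hp2'
        rw [hbi1] at hp3
        have hp3' := Option.some.inj hp3
        subst hp3'
        rcases (pv_cand_spec rem n pos j hsort hj0 hjlen hjlo hjhi k hk).2 hjk with hc | hc
        · exact pv_lex_trans (by simpa using hlex2) hc
        · refine pv_lex_trans ?_ hc
          have : ((rem.length : Int) - 1).toNat = rem.length - 1 := by omega
          rw [this] at hlex3
          exact hlex3


-- membership after removing index b from a duplicate-free list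
theorem pv_mem_eraseIdx (l : List Int) (hnd : l.Nodup) (b : Nat) (hb : b < l.length) (x : Int) :
    x ∈ l.eraseIdx b ↔ (x ∈ l ∧ x ≠ l[b]) := by
  have hdec : l = l.take b ++ l[b] :: l.drop (b + 1) := by
    conv_lhs => rw [← List.take_append_drop b l]
    rw [List.getElem_cons_drop]
  rw [List.eraseIdx_eq_take_drop_succ]
  constructor
  · intro hx
    have hxl : x ∈ l := by
      rw [hdec]
      rcases List.mem_append.mp hx with h | h
      · exact List.mem_append.mpr (Or.inl h)
      · exact List.mem_append.mpr (Or.inr (List.mem_cons_of_mem _ h))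
    refine ⟨hxl, ?_⟩
    intro hxe
    subst hxe
    have hnd' := hdec ▸ hnd
    rw [List.nodup_append] at hnd'
    rcases List.mem_append.mp hx with h | h
    · exact hnd'.2.2 _ h _ (List.mem_cons_self ..) rfl
    · exact (List.nodup_cons.mp hnd'.2.1).1 h
  · rintro ⟨hxl, hxe⟩
    rw [hdec] at hxl
    rcases List.mem_append.mp hxl with h | h
    · exact List.mem_append.mpr (Or.inl h)
    · rcases List.mem_cons.mp h with h' | h'
      · exact absurd h' hxe
      · exact List.mem_append.mpr (Or.inr h')

-- the mapped sum splits off the removed element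
theorem pv_sum_eraseIdx (g : Int → Int) (l : List Int) (b : Nat) (hb : b < l.length) :
    (l.map g).sum = g l[b] + ((l.eraseIdx b).map g).sum := by
  have hdec : l = l.take b ++ l[b] :: l.drop (b + 1) := by
    conv_lhs => rw [← List.take_append_drop b l]
    rw [List.getElem_cons_drop]
  conv_lhs => rw [hdec]
  rw [List.eraseIdx_eq_take_drop_succ, List.map_append, List.map_cons, List.sum_append,
    List.sum_cons, List.map_append, List.sum_append]
  ring


-- A's loop exits immediately when no zeros remain
theorem pv_loopA_done (cs : List Char) (n : Int) (fa : Nat) (pos : Int) (visited : List Int)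
    (count : Int) (h : ¬ 0 < visited.count 0) :
    pvLoopA cs n fa pos visited count = count := by
  cases fa with
  | zero => rfl
  | succ fa' => unfold pvLoopA; rw [if_neg h]

-- the step-coupled simulation: A's loop equals B's loop under the state correspondence
theorem pv_main : ∀ (fb fa : Nat) (cs : List Char) (visited rem : List Int) (pos j count total : Int),
    visited.length = cs.length →
    (∀ i : Int, i ∈ rem ↔ (0 ≤ i ∧ i.toNat < visited.length ∧ visited[i.toNat]? = some 0)) →
    rem.Pairwise (· < ·) →
    0 ≤ pos → pos < (cs.length : Int) →
    pos ∉ rem →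
    0 ≤ j → j ≤ (rem.length : Int) →
    (∀ k : Nat, k < j.toNat → rem.getD k 0 < pos) →
    (∀ k : Nat, j.toNat ≤ k → k < rem.length → pos < rem.getD k 0) →
    total = count + (rem.map (fun i => pvVertB (cs.getD i.toNat 'A'))).sum →
    rem.length ≤ fa → rem.length ≤ fb →
    pvLoopA cs (cs.length : Int) fa pos visited count =
      pvLoopB (cs.length : Int) fb rem pos j total := by
  intro fb
  induction fb with
  | zero =>
    intro fa cs visited rem pos j count total hlen hmem hsort hp0 hpn hpnot hj0 hjlen hjlo hjhi htot hfa hfb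
    have hrem : rem = [] := List.eq_nil_of_length_eq_zero (by omega)
    subst hrem
    have hnz : ¬ 0 < visited.count 0 := by
      intro h
      obtain ⟨k, hk, h0⟩ := List.mem_iff_getElem.mp (List.count_pos_iff.mp h)
      have : (k : Int) ∈ ([] : List Int) := (hmem k).mpr
        ⟨Int.natCast_nonneg k, by simpa using hk, by rw [Int.toNat_natCast, List.getElem?_eq_getElem hk, h0]⟩
      simp at this
    rw [pv_loopA_done _ _ _ _ _ _ hnz]
    simp at htot
    simp [pvLoopB, htot]
  | succ fb ih =>
    intro fa cs visited rem pos j count total hlen hmem hsort hp0 hpn hpnot hj0 hjlen hjlo hjhi htot hfa hfb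
    rcases rem with _ | ⟨r0, rest⟩
    · have hnz : ¬ 0 < visited.count 0 := by
        intro h
        obtain ⟨k, hk, h0⟩ := List.mem_iff_getElem.mp (List.count_pos_iff.mp h)
        have : (k : Int) ∈ ([] : List Int) := (hmem k).mpr
          ⟨Int.natCast_nonneg k, by simpa using hk, by rw [Int.toNat_natCast, List.getElem?_eq_getElem hk, h0]⟩
        simp at this
      rw [pv_loopA_done _ _ _ _ _ _ hnz]
      simp at htot
      simp [pvLoopB, htot]
    · -- rem = r0 :: rest, one synchronized step
      cases fa with
      | zero => simp at hfa
      | succ fa' =>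
      have hr0 : r0 ∈ r0 :: rest := List.mem_cons_self ..
      obtain ⟨hr00, hr0len, hr0v⟩ := (hmem r0).mp hr0
      have hguard : 0 < visited.count 0 := by
        rw [List.count_pos_iff]
        refine List.mem_iff_getElem.mpr ⟨r0.toNat, hr0len, ?_⟩
        rw [List.getElem?_eq_getElem hr0len] at hr0v
        exact Option.some.inj hr0v
      have hn1 : (0:Int) ≤ cs.length := by positivity
      have hbounds : ∀ i ∈ r0 :: rest, 0 ≤ i ∧ i < (cs.length : Int) := by
        intro i hi
        obtain ⟨h1, h2, _⟩ := (hmem i).mp hi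
        omega
      -- A's distance list is rem mapped through (i, dB i)
      have hz : pvZs visited = r0 :: rest :=
        pv_sorted_ext _ _ (pv_pairwise_pvZs _) hsort
          (fun x => (pv_mem_pvZs _ _).trans (hmem x).symm)
      have hfun : (fun p : Int × Int => if p.2 = 0 then some (p.1, pvDistA (cs.length : Int) pos p.1) else none)
          = fun p : Int × Int => (if p.2 = 0 then some p.1 else none).map
              (fun i => (i, pvDistA (cs.length : Int) pos i)) := by
        funext p
        by_cases h : p.2 = 0 <;> simp [h]
      have hdist : (PySem.List.enumerate visited).filterMap
            (fun p => if p.2 = 0 then some (p.1, pvDistA (cs.length : Int) pos p.1) else none)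
          = (r0 :: rest).map (fun i => (i, pvDistB (cs.length : Int) pos i)) := by
        rw [hfun, ← List.map_filterMap]
        show (pvZs visited).map _ = _
        rw [hz]
        refine List.map_congr_left ?_
        intro i hi
        obtain ⟨h1, h2⟩ := hbounds i hi
        rw [pv_dist_eq _ _ _ hp0 hpn h1 h2]
      -- A side: take the head of the stable sort = lexicographic minimum
      have hhead := pv_head?_sorted (fun x : Int × Int => x.2)
        ((r0, pvDistB (cs.length : Int) pos r0))
        (rest.map (fun i => (i, pvDistB (cs.length : Int) pos i)))
      have hb1 : ∀ y ∈ rest.map (fun i => (i, pvDistB (cs.length : Int) pos i)),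
          ((r0, pvDistB (cs.length : Int) pos r0) : Int × Int).1 < y.1 := by
        rintro y hy
        obtain ⟨i, hi, rfl⟩ := List.mem_map.mp hy
        simpa using (List.pairwise_cons.mp hsort).1 i hi
      have hpw : (rest.map (fun i => (i, pvDistB (cs.length : Int) pos i))).Pairwise
          (fun p q : Int × Int => p.1 < q.1) := by
        rw [List.pairwise_map]
        exact ((List.pairwise_cons.mp hsort).2).imp (by intro a b h; simpa using h)
      obtain ⟨hm1, hm2⟩ := pv_runmin_lex _ _ hb1 hpw
      -- B side: the three-candidate pick
      obtain ⟨bi, hbi0, hbilen, hpick, hmin⟩ :=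
        pv_pick_spec (r0 :: rest) (cs.length : Int) pos j hsort hj0 hjlen hjlo hjhi (by simp)
      obtain ⟨bN, rfl⟩ : ∃ bN : Nat, bi = (bN : Int) := ⟨bi.toNat, by omega⟩
      simp only [Int.toNat_natCast] at hbilen hpick hmin
      -- the two selections coincide
      have hAlex : ∀ i ∈ r0 :: rest,
          pvLex (((rest.map (fun i : Int => (i, pvDistB (cs.length : Int) pos i))).foldl
              (fun b y => if y.2 < b.2 then y else b) (r0, pvDistB (cs.length : Int) pos r0)).2,
            ((rest.map (fun i : Int => (i, pvDistB (cs.length : Int) pos i))).foldl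
              (fun b y => if y.2 < b.2 then y else b) (r0, pvDistB (cs.length : Int) pos r0)).1)
            (pvDistB (cs.length : Int) pos i, i) := by
        intro i hi
        rcases List.mem_cons.mp hi with rfl | hi'
        · rcases hm1 with h | ⟨_, h2⟩
          · rw [h]; exact Or.inr ⟨rfl, le_rfl⟩
          · exact Or.inl h2
        · rcases hm2 _ (List.mem_map_of_mem hi') with h | ⟨h1, h2⟩
          · exact Or.inl h
          · exact Or.inr ⟨h1, h2⟩
      have hmmem : ((rest.map (fun i : Int => (i, pvDistB (cs.length : Int) pos i))).foldl
              (fun b y => if y.2 < b.2 then y else b) (r0, pvDistB (cs.length : Int) pos r0))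
          ∈ (r0 :: rest).map (fun i : Int => (i, pvDistB (cs.length : Int) pos i)) := by
        rcases hm1 with h | ⟨h, _⟩
        · rw [h]; exact List.mem_cons_self ..
        · exact List.mem_cons_of_mem _ h
      obtain ⟨iA, hiA, hfiA⟩ := List.mem_map.mp hmmem
      obtain ⟨k, hk, hkeq⟩ := List.mem_iff_getElem.mp hiA
      have hgetk : (r0 :: rest).getD k 0 = iA := by
        rw [List.getD_eq_getElem _ _ hk, hkeq]
      have hminiA := hmin k hk
      rw [hgetk] at hminiA
      have histar_mem : (r0 :: rest).getD bN 0 ∈ r0 :: rest := by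
        rw [List.getD_eq_getElem _ _ hbilen]
        exact List.getElem_mem _
      have hAi := hAlex _ histar_mem
      have hm12 : ((rest.map (fun i : Int => (i, pvDistB (cs.length : Int) pos i))).foldl
              (fun b y => if y.2 < b.2 then y else b) (r0, pvDistB (cs.length : Int) pos r0))
          = (iA, pvDistB (cs.length : Int) pos iA) := hfiA.symm
      rw [hm12] at hAi
      have heq : iA = (r0 :: rest).getD bN 0 := by
        unfold pvLex at hminiA hAi
        simp only at hminiA hAi
        omega
      -- reduce A's loop body
      conv_lhs => rw [pvLoopA]
      rw [if_pos hguard, hdist, List.map_cons]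
      cases hs : PySem.List.sorted ((r0, pvDistB (cs.length : Int) pos r0) ::
          rest.map (fun i : Int => (i, pvDistB (cs.length : Int) pos i))) (fun x => x.2) false with
      | nil =>
        rw [hs] at hhead
        cases hhead
      | cons m' t' =>
        rw [hs] at hhead
        have hm'm : m' = (iA, pvDistB (cs.length : Int) pos iA) := by
          rw [List.head?_cons] at hhead
          rw [Option.some.inj hhead, hm12]
        simp only [hm'm]
        -- reduce B's loop body
        have hpop : PySem.List.pop? (r0 :: rest) (bN : Int)
            = some ((r0 :: rest)[bN], (r0 :: rest).eraseIdx bN) :=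
          PySem.List.pop?_natCast _ bN hbilen
        conv_rhs => rw [pvLoopB]
        simp only [hpick, hpop]
        show _ = pvLoopB (cs.length : Int) fb ((r0 :: rest).eraseIdx bN)
          ((r0 :: rest).getD bN 0) (bN : Int)
          (total + pvDistB (cs.length : Int) pos ((r0 :: rest).getD bN 0))
        rw [← heq]
        -- re-establish the invariants for the next iteration
        have hnd : (r0 :: rest).Nodup := hsort.imp ne_of_lt
        have hiAb : (r0 :: rest)[bN] = iA := by
          rw [heq]
          exact (List.getD_eq_getElem _ _ hbilen).symm
        obtain ⟨hiA0, hiAlen, hiAv⟩ := (hmem iA).mp hiA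
        have hiAcs : iA.toNat < cs.length := hlen ▸ hiAlen
        have hlen' : (visited.set iA.toNat 1).length = cs.length := by
          rw [List.length_set]; exact hlen
        have hmem' : ∀ i : Int, i ∈ (r0 :: rest).eraseIdx bN ↔
            (0 ≤ i ∧ i.toNat < (visited.set iA.toNat 1).length ∧
              (visited.set iA.toNat 1)[i.toNat]? = some 0) := by
          intro i
          rw [pv_mem_eraseIdx _ hnd bN hbilen i, hiAb, hmem i, List.length_set]
          constructor
          · rintro ⟨⟨h1, h2, h3⟩, hne⟩
            refine ⟨h1, h2, ?_⟩
            rw [List.getElem?_set_ne (by omega : iA.toNat ≠ i.toNat)]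
            exact h3
          · rintro ⟨h1, h2, h3⟩
            by_cases hii : iA.toNat = i.toNat
            · rw [← hii, List.getElem?_set_self hiAlen] at h3
              cases h3
            · rw [List.getElem?_set_ne hii] at h3
              exact ⟨⟨h1, h2, h3⟩, by omega⟩
        have hsort' : ((r0 :: rest).eraseIdx bN).Pairwise (· < ·) :=
          hsort.sublist (List.eraseIdx_sublist (r0 :: rest) bN)
        have hpn' : iA < (cs.length : Int) := by omega
        have hpnot' : iA ∉ (r0 :: rest).eraseIdx bN := by
          intro h
          exact ((pv_mem_eraseIdx _ hnd bN hbilen iA).mp h).2 hiAb.symm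
        have hlenE : ((r0 :: rest).eraseIdx bN).length = (r0 :: rest).length - 1 := by
          rw [List.length_eraseIdx, if_pos hbilen]
        have hjlen' : (bN : Int) ≤ (((r0 :: rest).eraseIdx bN).length : Int) := by
          rw [hlenE]; push_cast [Nat.cast_sub (by omega : 1 ≤ (r0 :: rest).length)]; omega
        have hjlo' : ∀ k : Nat, k < ((bN : Int)).toNat → ((r0 :: rest).eraseIdx bN).getD k 0 < iA := by
          intro k hk
          rw [Int.toNat_natCast] at hk
          have h1 : ((r0 :: rest).eraseIdx bN)[k]? = (r0 :: rest)[k]? :=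
            List.getElem?_eraseIdx_of_lt hk
          rw [List.getD_eq_getElem?_getD, h1, ← List.getD_eq_getElem?_getD]
          have := pv_getD_mono _ hsort k bN hk hbilen
          rwa [List.getD_eq_getElem _ _ hbilen, hiAb] at this
        have hjhi' : ∀ k : Nat, ((bN : Int)).toNat ≤ k → k < ((r0 :: rest).eraseIdx bN).length →
            iA < ((r0 :: rest).eraseIdx bN).getD k 0 := by
          intro k hk hklen
          rw [Int.toNat_natCast] at hk
          have hk1 : k + 1 < (r0 :: rest).length := by omega
          have h1 : ((r0 :: rest).eraseIdx bN)[k]? = (r0 :: rest)[k + 1]? :=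
            List.getElem?_eraseIdx_of_ge hk
          rw [List.getD_eq_getElem?_getD, h1, ← List.getD_eq_getElem?_getD]
          have := pv_getD_mono _ hsort bN (k + 1) (by omega) hk1
          rwa [List.getD_eq_getElem _ _ hbilen, hiAb] at this
        have hsum := pv_sum_eraseIdx (fun i => pvVertB (cs.getD i.toNat 'A')) (r0 :: rest) bN hbilen
        rw [hiAb] at hsum
        have htot' : total + pvDistB (cs.length : Int) pos iA =
            (count + pvDistB (cs.length : Int) pos iA + pvVertA cs iA.toNat) +
              (((r0 :: rest).eraseIdx bN).map (fun i => pvVertB (cs.getD i.toNat 'A'))).sum := by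
          rw [htot, hsum, pv_vert_eq]
          ring
        exact ih fa' cs (visited.set iA.toNat 1) ((r0 :: rest).eraseIdx bN) iA (bN : Int)
          (count + pvDistB (cs.length : Int) pos iA + pvVertA cs iA.toNat)
          (total + pvDistB (cs.length : Int) pos iA)
          hlen' hmem' hsort' hiA0 hpn' hpnot' (by positivity) hjlen' hjlo' hjhi' htot'
          (by omega) (by omega)





-- initial visited array of A: entry k is 1 iff k = 0 or the letter is 'A'
theorem pv_visited_init (cs : List Char) (k : Nat) (hk : k < cs.length) (hn : 0 < cs.length) :
    (((List.range cs.length).foldl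
        (fun v x => if cs.getD x 'A' = 'A' then v.set x 1 else v)
        (List.replicate cs.length (0 : Int))).set 0 1)[k]? =
      some (if k = 0 ∨ cs.getD k 'A' = 'A' then 1 else 0) := by
  have hlenW : ((List.range cs.length).foldl
      (fun v x => if cs.getD x 'A' = 'A' then v.set x 1 else v)
      (List.replicate cs.length (0 : Int))).length = cs.length := by
    rw [pv_foldl_set_length (fun x => cs.getD x 'A' = 'A'), List.length_replicate]
  by_cases hk0 : k = 0
  · subst hk0
    rw [List.getElem?_set_self (by omega), if_pos (Or.inl rfl)]
  · rw [List.getElem?_set_ne (fun h => hk0 h.symm),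
      pv_foldl_set_getElem? (fun x => cs.getD x 'A' = 'A') _ _ k (by rwa [List.length_replicate])]
    by_cases hP : cs.getD k 'A' = 'A'
    · rw [if_pos ⟨List.mem_range.mpr hk, hP⟩, if_pos (Or.inr hP)]
    · rw [if_neg (fun h => hP h.2), if_neg (by tauto), List.getElem?_replicate, if_pos hk]

-- ===== VERDICT (by name: the statement is the Claim_ definition above) =====
theorem solution_spec : Claim_equal_solution := by
  unfold Claim_equal_solution
  intro name _hdom hpre
  unfold Spec_solution solution solution_alt
  have hcs : name.toList ≠ [] := fun hl => hpre (String.toList_eq_nil_iff.mp hl)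
  have hn : 0 < name.toList.length := List.length_pos_of_ne_nil hcs
  show pvLoopA name.toList (name.toList.length : Int) (name.toList.length + 1) 0
      (((List.range name.toList.length).foldl
          (fun v x => if name.toList.getD x 'A' = 'A' then v.set x 1 else v)
          (List.replicate name.toList.length (0 : Int))).set 0 1)
      (pvVertA name.toList 0)
    = pvLoopB (name.toList.length : Int)
      ((PySem.List.pyRange 1 (name.toList.length : Int) 1).foldl
        (fun (st : Int × List Int) i =>
          if name.toList.getD i.toNat 'A' ≠ 'A'
          then (st.1 + pvVertB (name.toList.getD i.toNat 'A'), st.2 ++ [i]) else st)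
        (pvVertB (name.toList.getD 0 'A'), [])).2.length
      ((PySem.List.pyRange 1 (name.toList.length : Int) 1).foldl
        (fun (st : Int × List Int) i =>
          if name.toList.getD i.toNat 'A' ≠ 'A'
          then (st.1 + pvVertB (name.toList.getD i.toNat 'A'), st.2 ++ [i]) else st)
        (pvVertB (name.toList.getD 0 'A'), [])).2 0 0
      ((PySem.List.pyRange 1 (name.toList.length : Int) 1).foldl
        (fun (st : Int × List Int) i =>
          if name.toList.getD i.toNat 'A' ≠ 'A'
          then (st.1 + pvVertB (name.toList.getD i.toNat 'A'), st.2 ++ [i]) else st)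
        (pvVertB (name.toList.getD 0 'A'), [])).1
  rw [pv_initfold (fun i => pvVertB (name.toList.getD i.toNat 'A'))
    (fun i => name.toList.getD i.toNat 'A' ≠ 'A')]
  rw [List.nil_append]
  show pvLoopA name.toList (name.toList.length : Int) (name.toList.length + 1) 0
      (((List.range name.toList.length).foldl
          (fun v x => if name.toList.getD x 'A' = 'A' then v.set x 1 else v)
          (List.replicate name.toList.length (0 : Int))).set 0 1)
      (pvVertA name.toList 0)
    = pvLoopB (name.toList.length : Int)
      ((PySem.List.pyRange 1 (name.toList.length : Int) 1).filter
        (fun i => decide (name.toList.getD i.toNat 'A' ≠ 'A'))).length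
      ((PySem.List.pyRange 1 (name.toList.length : Int) 1).filter
        (fun i => decide (name.toList.getD i.toNat 'A' ≠ 'A'))) 0 0
      (pvVertB (name.toList.getD 0 'A') +
        (((PySem.List.pyRange 1 (name.toList.length : Int) 1).filter
          (fun i => decide (name.toList.getD i.toNat 'A' ≠ 'A'))).map
          (fun i => pvVertB (name.toList.getD i.toNat 'A'))).sum)
  have hV1 := pv_visited_init name.toList
  have hlenV : (((List.range name.toList.length).foldl
      (fun v x => if name.toList.getD x 'A' = 'A' then v.set x 1 else v)
      (List.replicate name.toList.length (0 : Int))).set 0 1).length = name.toList.length := by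
    rw [List.length_set, pv_foldl_set_length (fun x => name.toList.getD x 'A' = 'A'),
      List.length_replicate]
  have hmemR : ∀ i : Int,
      i ∈ (PySem.List.pyRange 1 (name.toList.length : Int) 1).filter
          (fun i => decide (name.toList.getD i.toNat 'A' ≠ 'A')) ↔
        (0 ≤ i ∧ i.toNat < (((List.range name.toList.length).foldl
            (fun v x => if name.toList.getD x 'A' = 'A' then v.set x 1 else v)
            (List.replicate name.toList.length (0 : Int))).set 0 1).length ∧
          (((List.range name.toList.length).foldl
            (fun v x => if name.toList.getD x 'A' = 'A' then v.set x 1 else v)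
            (List.replicate name.toList.length (0 : Int))).set 0 1)[i.toNat]? = some 0) := by
    intro i
    rw [List.mem_filter, PySem.List.mem_pyRange_one, hlenV]
    constructor
    · rintro ⟨⟨h1, h2⟩, h3⟩
      have h3' : name.toList.getD i.toNat 'A' ≠ 'A' := of_decide_eq_true h3
      have hklt : i.toNat < name.toList.length := by omega
      refine ⟨by omega, hklt, ?_⟩
      rw [hV1 i.toNat hklt hn, if_neg (by push Not; exact ⟨by omega, h3'⟩)]
    · rintro ⟨h1, h2, h3⟩
      rw [hV1 i.toNat h2 hn] at h3
      by_cases hc : i.toNat = 0 ∨ name.toList.getD i.toNat 'A' = 'A'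
      · rw [if_pos hc] at h3; cases h3
      · push Not at hc
        exact ⟨⟨by omega, by omega⟩, decide_eq_true hc.2⟩
  refine pv_main _ _ name.toList _ _ 0 0 (pvVertA name.toList 0) _ hlenV hmemR
    (List.Pairwise.filter _ (PySem.List.pairwise_lt_pyRange_one 1 (name.toList.length : Int)))
    le_rfl (by exact_mod_cast hn) ?_ le_rfl (by positivity) ?_ ?_ ?_ ?_ ?_
  · intro h
    have h2 := ((hmemR 0).mp h).2.2
    rw [show (0:Int).toNat = 0 from rfl, hV1 0 (by omega) hn, if_pos (Or.inl rfl)] at h2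
    cases h2
  · intro k hk
    simp at hk
  · intro k _ hklen
    have hgm : ((PySem.List.pyRange 1 (name.toList.length : Int) 1).filter
        (fun i => decide (name.toList.getD i.toNat 'A' ≠ 'A'))).getD k 0 ∈
        (PySem.List.pyRange 1 (name.toList.length : Int) 1).filter
        (fun i => decide (name.toList.getD i.toNat 'A' ≠ 'A')) := by
      rw [List.getD_eq_getElem _ _ hklen]
      exact List.getElem_mem _
    have hmem1 := (List.mem_filter.mp hgm).1
    have := (PySem.List.mem_pyRange_one).mp hmem1
    omega
  · rw [pv_vert_eq]
  · have hle := List.length_filter_le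
      (fun i => decide (name.toList.getD i.toNat 'A' ≠ 'A'))
      (PySem.List.pyRange 1 (name.toList.length : Int) 1)
    have := PySem.List.length_pyRange_one 1 (name.toList.length : Int)
    omega
  · exact le_rfl
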